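-- pv_equiv track=rewrite | github.com/niclasgriesshaber/llm_patent_pipeline | src/benchmarking/scripts/core/benchmarking.py | create_two_way_availability_summary
-- ===== SOURCE A (Python) =====
-- from typing import List, Tuple, Dict, Any
--
-- def create_two_way_availability_summary(file_matrix: Dict) -> str:
--     """Create file availability summary for two-way comparison (Perfect vs LLM only)."""
--     total_files = len(file_matrix)
--     perfect_available = sum(1 for data in file_matrix.values() if 'perfect' in data['available'])
--     llm_available = sum(1 for data in file_matrix.values() if 'llm' in data['available'])
--     both_available = sum(1 for data in file_matrix.values() if 'perfect' in data['available'] and 'llm' in data['available'])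
--
--     return f'''
--     <div class="availability-summary">
--         <h2>File Availability Summary</h2>
--         <p><strong>Total files:</strong> {total_files}</p>
--         <p><strong>Perfect transcriptions available:</strong> {perfect_available}</p>
--         <p><strong>LLM-generated transcriptions available:</strong> {llm_available}</p>
--         <p><strong>Files with both Perfect and LLM transcriptions:</strong> {both_available}</p>
--     </div>
--     '''
-- ===== SOURCE B (Python) =====
-- def create_two_way_availability_summary(file_matrix):
--     """Create file availability summary for two-way comparison (Perfect vs LLM only)."""
--     # Classify each file into one of four availability categories and tally a
--     # frequency table; the three counts are then derived arithmetically.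
--     buckets = {}
--     for data in file_matrix.values():
--         avail = data['available']
--         key = ('perfect' in avail, 'llm' in avail)
--         buckets[key] = buckets.get(key, 0) + 1
--     n_both = buckets.get((True, True), 0)
--     total_files = len(file_matrix)
--     perfect_available = n_both + buckets.get((True, False), 0)
--     llm_available = n_both + buckets.get((False, True), 0)
--     both_available = n_both
--     return f'''
--     <div class="availability-summary">
--         <h2>File Availability Summary</h2>
--         <p><strong>Total files:</strong> {total_files}</p>
--         <p><strong>Perfect transcriptions available:</strong> {perfect_available}</p>
--         <p><strong>LLM-generated transcriptions available:</strong> {llm_available}</p>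
--         <p><strong>Files with both Perfect and LLM transcriptions:</strong> {both_available}</p>
--     </div>
--     '''
-- ===== Notes on version B (the rewrite author's own statement) =====
-- stated objective: alternative
-- what changed: Instead of counting each of the three predicates directly over the dict values, B builds a frequency table keyed by the four availability categories (has_perfect, has_llm) in one pass and derives the three counts arithmetically from the bucket tallies (perfect = both + perfect-only, llm = both + llm-only).
import Mathlib
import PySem

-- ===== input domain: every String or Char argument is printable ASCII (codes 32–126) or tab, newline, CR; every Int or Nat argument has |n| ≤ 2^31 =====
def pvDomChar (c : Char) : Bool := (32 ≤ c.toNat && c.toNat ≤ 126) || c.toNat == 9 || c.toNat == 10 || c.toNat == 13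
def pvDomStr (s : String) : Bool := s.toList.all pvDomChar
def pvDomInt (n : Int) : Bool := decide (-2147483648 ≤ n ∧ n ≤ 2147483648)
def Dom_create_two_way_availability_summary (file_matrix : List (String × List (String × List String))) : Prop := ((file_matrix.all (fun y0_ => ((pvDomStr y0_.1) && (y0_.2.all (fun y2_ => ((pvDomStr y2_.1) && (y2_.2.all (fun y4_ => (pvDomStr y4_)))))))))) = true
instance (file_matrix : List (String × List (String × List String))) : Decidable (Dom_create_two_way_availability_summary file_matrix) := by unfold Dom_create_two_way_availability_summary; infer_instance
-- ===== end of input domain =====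

-- B replaces A's three direct predicate counts by a four-bucket frequency table over
-- (has_perfect, has_llm) categories and derives the counts arithmetically; same HTML.

-- the shared f-string template (identical literal text in A and in B)
def pvSummaryHtml (total perfect llm both : Int) : String :=
  "\n    <div class=\"availability-summary\">\n        <h2>File Availability Summary</h2>\n        <p><strong>Total files:</strong> " ++ PySem.Int.toStr total ++
  "</p>\n        <p><strong>Perfect transcriptions available:</strong> " ++ PySem.Int.toStr perfect ++
  "</p>\n        <p><strong>LLM-generated transcriptions available:</strong> " ++ PySem.Int.toStr llm ++
  "</p>\n        <p><strong>Files with both Perfect and LLM transcriptions:</strong> " ++ PySem.Int.toStr both ++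
  "</p>\n    </div>\n    "

-- ===== PORT A =====
-- data['available'] is ported as getD … []: exact wherever Python returns (Pre_ excludes the KeyError inputs).
def create_two_way_availability_summary (file_matrix : List (String × List (String × List String))) : String :=
  let total_files : Int := file_matrix.length
  let perfect_available : Int := file_matrix.foldl
    (fun acc e => if ((PySem.Dict.mk e.2).getD "available" []).contains "perfect" then acc + 1 else acc) 0
  let llm_available : Int := file_matrix.foldl
    (fun acc e => if ((PySem.Dict.mk e.2).getD "available" []).contains "llm" then acc + 1 else acc) 0
  let both_available : Int := file_matrix.foldl
    (fun acc e => if ((PySem.Dict.mk e.2).getD "available" []).contains "perfect" &&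
                     ((PySem.Dict.mk e.2).getD "available" []).contains "llm" then acc + 1 else acc) 0
  pvSummaryHtml total_files perfect_available llm_available both_available

-- ===== PORT B =====
-- the bucket loop: buckets[key] = buckets.get(key, 0) + 1
def pvBuckets (file_matrix : List (String × List (String × List String))) : PySem.Dict (Bool × Bool) Int :=
  file_matrix.foldl
    (fun d e =>
      let avail := (PySem.Dict.mk e.2).getD "available" []
      let key := (avail.contains "perfect", avail.contains "llm")
      d.insert key (d.getD key 0 + 1))
    PySem.Dict.empty

def create_two_way_availability_summary_alt (file_matrix : List (String × List (String × List String))) : String :=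
  let buckets := pvBuckets file_matrix
  let n_both := buckets.getD (true, true) 0
  let total_files : Int := file_matrix.length
  let perfect_available := n_both + buckets.getD (true, false) 0
  let llm_available := n_both + buckets.getD (false, true) 0
  let both_available := n_both
  pvSummaryHtml total_files perfect_available llm_available both_available

-- ===== PRECONDITION & SPEC =====
-- Pre_ excludes exactly the inputs where Python A raises KeyError: an entry whose dict lacks 'available'.
def Pre_create_two_way_availability_summary (file_matrix : List (String × List (String × List String))) : Prop :=
  (file_matrix.all (fun e => (PySem.Dict.mk e.2).contains "available")) = true
instance (file_matrix : List (String × List (String × List String))) : Decidable (Pre_create_two_way_availability_summary file_matrix) := by unfold Pre_create_two_way_availability_summary; infer_instance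

def pvWitness_create_two_way_availability_summary : (List (String × List (String × List String))) :=
  [("f1", [("available", ["perfect", "llm"])]), ("f2", [("available", ["llm"])])]

def Spec_create_two_way_availability_summary (file_matrix : List (String × List (String × List String))) (out : String) : Prop := out = create_two_way_availability_summary_alt file_matrix
instance (file_matrix : List (String × List (String × List String))) (out : String) : Decidable (Spec_create_two_way_availability_summary file_matrix out) := by unfold Spec_create_two_way_availability_summary; infer_instance

-- ===== CLAIM (what is proved, stated in full; the proofs are below) =====
def Claim_equal_create_two_way_availability_summary : Prop := ∀ (file_matrix : List (String × List (String × List String))), Dom_create_two_way_availability_summary file_matrix → Pre_create_two_way_availability_summary file_matrix → Spec_create_two_way_availability_summary file_matrix (create_two_way_availability_summary file_matrix)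

-- ===== LEMMAS AND PROOFS =====

-- the category key of one entry
def pvKey (e : String × List (String × List String)) : Bool × Bool :=
  let avail := (PySem.Dict.mk e.2).getD "available" []
  (avail.contains "perfect", avail.contains "llm")

-- each bucket of B's frequency table is the count of its category key
theorem pvBuckets_getD (fm : List (String × List (String × List String))) (k : Bool × Bool) :
    (pvBuckets fm).getD k 0 = ((fm.map pvKey).count k : Int) := by
  have h : pvBuckets fm = (fm.map pvKey).foldl
      (fun d x => d.insert x (d.getD x 0 + 1)) PySem.Dict.empty := by
    rw [List.foldl_map]; rfl
  rw [h, PySem.Dict.getD_foldl_insert_add_one, PySem.Dict.getD_empty]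
  simp

-- A's predicate count splits into the matching bucket counts
theorem pvCount_split (fm : List (String × List (String × List String)))
    (p : (String × List (String × List String)) → Bool) (k1 k2 : Bool × Bool)
    (hne : k1 ≠ k2) (hp : ∀ e, p e = true ↔ pvKey e = k1 ∨ pvKey e = k2) :
    ∀ acc : Int, fm.foldl (fun acc e => if p e then acc + 1 else acc) acc =
      acc + ((fm.map pvKey).count k1 + (fm.map pvKey).count k2 : Int) := by
  induction fm with
  | nil => intro acc; simp
  | cons e rest ih =>
    intro acc
    simp only [List.foldl_cons, List.map_cons, List.count_cons, ih]
    by_cases h : p e = true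
    · rcases (hp e).mp h with hk | hk <;>
        simp [h, hk, hne, hne.symm] <;> push_cast <;> omega
    · have h1 : pvKey e ≠ k1 := fun hk => h ((hp e).mpr (Or.inl hk))
      have h2 : pvKey e ≠ k2 := fun hk => h ((hp e).mpr (Or.inr hk))
      simp [h, h1, h2]

-- both-count is the (true,true) bucket count
theorem pvCount_both (fm : List (String × List (String × List String))) :
    ∀ acc : Int, fm.foldl (fun acc e =>
        if ((PySem.Dict.mk e.2).getD "available" []).contains "perfect" &&
           ((PySem.Dict.mk e.2).getD "available" []).contains "llm" then acc + 1 else acc) acc =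
      acc + ((fm.map pvKey).count (true, true) : Int) := by
  induction fm with
  | nil => intro acc; simp
  | cons e rest ih =>
    intro acc
    simp only [List.foldl_cons, List.map_cons, List.count_cons, ih]
    by_cases hP : "perfect" ∈ (PySem.Dict.mk e.2).getD "available" [] <;>
      by_cases hL : "llm" ∈ (PySem.Dict.mk e.2).getD "available" [] <;>
        simp [pvKey, hP, hL, Prod.ext_iff] <;> push_cast <;> omega

-- ===== VERDICT (by name: the statement is the Claim_ definition above) =====
theorem create_two_way_availability_summary_spec : Claim_equal_create_two_way_availability_summary := by
  intro fm _ _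
  show _ = _
  simp only [create_two_way_availability_summary, create_two_way_availability_summary_alt,
    pvBuckets_getD]
  rw [pvCount_split fm _ (true, true) (true, false) (by decide)
        (fun e => by simp [pvKey, Prod.ext_iff]; tauto),
      pvCount_split fm _ (true, true) (false, true) (by decide)
        (fun e => by simp [pvKey, Prod.ext_iff]; tauto),
      pvCount_both fm]
  simp
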